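-- pv_equiv track=rewrite | github.com/Recla1mer/picture_analysis | pa.py | get_directory
-- ===== SOURCE A (Python) =====
-- def get_directory(string):
--     """
--     SIDE FUNCTION
--
--     Tries to separate the string (path) into filename and directories. Returns directories
--     if existing.
--
--     ARGUMENTS:
--     - string: (string)
--     """
--     position = -1
--     for i in range(0, len(string)):
--         if string[i] == "/":
--             position = i
--     if position == -1:
--         return ""
--     else:
--         return string[0:position+1]
-- ===== SOURCE B (Python) =====
-- def get_directory(string):
--     i = len(string)
--     while i > 0 and string[i - 1] != "/":
--         i -= 1
--     return string[:i]
-- ===== Notes on version B (the rewrite author's own statement) =====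
-- stated objective: alternative
-- what changed: B scans backward from the end of the string and stops at the first '/' it meets, returning the prefix up to that point, instead of A's full forward scan that records the last slash index and then slices; no -1 sentinel or final branch is needed.
import Mathlib
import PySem

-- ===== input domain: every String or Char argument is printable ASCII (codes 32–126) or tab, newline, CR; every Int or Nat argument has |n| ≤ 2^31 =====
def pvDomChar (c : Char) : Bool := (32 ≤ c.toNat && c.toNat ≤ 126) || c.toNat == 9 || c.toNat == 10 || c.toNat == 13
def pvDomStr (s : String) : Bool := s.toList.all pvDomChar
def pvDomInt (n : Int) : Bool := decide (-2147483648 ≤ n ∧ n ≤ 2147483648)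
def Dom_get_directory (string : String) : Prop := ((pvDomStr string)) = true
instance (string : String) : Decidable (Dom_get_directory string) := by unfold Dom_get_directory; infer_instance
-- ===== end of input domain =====

-- B scans backward from the end and stops at the first '/', instead of A's forward
-- scan over all indices recording the last slash position; same O(n) cost, different decomposition.


-- ===== PORT A =====
-- A's for-loop: position := -1; for i in range(0, len(string)): if string[i] == '/': position := i
-- (all indices are in range, so Python's string[i] is exactly pyGetD with any default)
def getDirPos (cs : List Char) : Int :=
  (PySem.List.pyRange 0 cs.length).foldl
    (fun position i => if PySem.List.pyGetD cs i ' ' = '/' then i else position) (-1)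

def get_directory (string : String) : String :=
  let cs := string.toList
  let position := getDirPos cs
  if position = -1 then ""
  else String.ofList (PySem.Chars.slice cs (some 0) (some (position + 1)))

-- ===== PORT B =====
-- B's while-loop: i := len; while i > 0 and string[i-1] != '/': i -= 1   (i-1 is in range, so getD is exact)
def altLoop (cs : List Char) : Nat → Nat
  | 0 => 0
  | i + 1 => if cs.getD i ' ' ≠ '/' then altLoop cs i else i + 1

def get_directory_alt (string : String) : String :=
  let cs := string.toList
  String.ofList (PySem.Chars.slice cs none (some (altLoop cs cs.length)))

-- ===== PRECONDITION & SPEC =====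
def Spec_get_directory (string : String) (out : String) : Prop := out = get_directory_alt string
instance (string : String) (out : String) : Decidable (Spec_get_directory string out) := by unfold Spec_get_directory; infer_instance

-- ===== CLAIM (what is proved, stated in full; the proofs are below) =====
def Claim_equal_get_directory : Prop := ∀ (string : String), Dom_get_directory string → Spec_get_directory string (get_directory string)

-- ===== LEMMAS AND PROOFS =====

theorem pyGetD_append_left (cs : List Char) (c : Char) (i : Int)
    (h0 : 0 ≤ i) (hl : i < cs.length) :
    PySem.List.pyGetD (cs ++ [c]) i ' ' = PySem.List.pyGetD cs i ' ' := by
  obtain ⟨n, rfl⟩ := Int.eq_ofNat_of_zero_le h0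
  rw [PySem.List.pyGetD_natCast, PySem.List.pyGetD_natCast]
  simp [List.getD_eq_getElem?_getD,
    List.getElem?_append_left (show n < cs.length by exact_mod_cast hl)]

theorem getDirPos_append (cs : List Char) (c : Char) :
    getDirPos (cs ++ [c]) = if c = '/' then (cs.length : Int) else getDirPos cs := by
  unfold getDirPos
  have hlen : ((cs ++ [c]).length : Int) = (cs.length : Int) + 1 := by simp
  rw [hlen, PySem.List.pyRange_one_succ_right (by positivity), List.foldl_append]
  have hinner :
      List.foldl (fun position i => if PySem.List.pyGetD (cs ++ [c]) i ' ' = '/' then i else position)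
        (-1) (PySem.List.pyRange 0 cs.length)
      = List.foldl (fun position i => if PySem.List.pyGetD cs i ' ' = '/' then i else position)
        (-1) (PySem.List.pyRange 0 cs.length) := by
    apply PySem.List.foldl_congr_mem
    intro acc x hx
    rw [PySem.List.mem_pyRange_one] at hx
    rw [pyGetD_append_left cs c x hx.1 hx.2]
  rw [hinner]
  have hc : PySem.List.pyGetD (cs ++ [c]) (cs.length : Int) ' ' = c := by
    rw [PySem.List.pyGetD_natCast]
    simp [List.getD_eq_getElem?_getD]
  simp only [List.foldl_cons, List.foldl_nil, hc]

theorem getDirPos_bounds (cs : List Char) : -1 ≤ getDirPos cs ∧ getDirPos cs < cs.length := by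
  induction cs using List.reverseRecOn with
  | nil => simp [getDirPos, PySem.List.pyRange]
  | append_singleton cs c ih =>
    rw [getDirPos_append]
    simp only [List.length_append, List.length_cons, List.length_nil]
    split <;> push_cast <;> omega

theorem altLoop_le (cs : List Char) (i : Nat) : altLoop cs i ≤ i := by
  induction i with
  | zero => simp [altLoop]
  | succ i ih => simp only [altLoop]; split <;> omega

theorem altLoop_append (cs : List Char) (c : Char) (i : Nat) (h : i ≤ cs.length) :
    altLoop (cs ++ [c]) i = altLoop cs i := by
  induction i with
  | zero => rfl
  | succ i ih =>
    have hg : (cs ++ [c]).getD i ' ' = cs.getD i ' ' := by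
      simp [List.getD_eq_getElem?_getD, List.getElem?_append_left (by omega : i < cs.length)]
    simp only [altLoop, hg, ih (by omega)]

theorem core_eq (cs : List Char) :
    (if getDirPos cs = -1 then "" else String.ofList (PySem.Chars.slice cs (some 0) (some (getDirPos cs + 1))))
      = String.ofList (PySem.Chars.slice cs none (some (altLoop cs cs.length))) := by
  induction cs using List.reverseRecOn with
  | nil => rfl
  | append_singleton cs c ih =>
    have hB := getDirPos_bounds cs
    have hn : (cs ++ [c]).length = cs.length + 1 := by simp
    have hgd : (cs ++ [c]).getD cs.length ' ' = c := by
      simp [List.getD_eq_getElem?_getD]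
    by_cases hc : c = '/'
    · -- last char is a slash: both sides return the whole string
      rw [getDirPos_append, if_pos hc, hn]
      have hne : ((cs.length : Int)) ≠ -1 := by omega
      rw [if_neg hne]
      have hA : PySem.Chars.slice (cs ++ [c]) (some 0) (some ((cs.length : Int) + 1))
          = List.take (cs.length + 1) (cs ++ [c]) := by
        have : ((cs.length : Int) + 1) = ((cs.length + 1 : Nat) : Int) := by push_cast; ring
        rw [this]
        rw [PySem.Chars.slice_eq_listSlice,
          show (some (0:Int)) = some ((0:Nat):Int) from rfl,
          PySem.List.slice_natCast]
        simp
      have hL : altLoop (cs ++ [c]) (cs.length + 1) = cs.length + 1 := by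
        simp [altLoop, hc]
      have hA' : PySem.Chars.slice (cs ++ [c]) none (some ((cs.length + 1 : Nat) : Int))
          = List.take (cs.length + 1) (cs ++ [c]) := by
        rw [PySem.Chars.slice_eq_listSlice, PySem.List.slice_to _ (by omega)]
        simp
      rw [hA, hL, hA']
    · -- last char is not a slash: both sides ignore it; reduce to cs and use the IH
      rw [getDirPos_append, if_neg hc, hn]
      have hL : altLoop (cs ++ [c]) (cs.length + 1) = altLoop cs cs.length := by
        rw [show altLoop (cs ++ [c]) (cs.length + 1)
            = if (cs ++ [c]).getD cs.length ' ' ≠ '/' then altLoop (cs ++ [c]) cs.length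
              else cs.length + 1 from rfl, hgd, if_pos hc,
          altLoop_append cs c cs.length le_rfl]
      rw [hL]
      have hkle : altLoop cs cs.length ≤ cs.length := altLoop_le cs cs.length
      have hRB : PySem.Chars.slice (cs ++ [c]) none (some (altLoop cs cs.length))
          = PySem.Chars.slice cs none (some (altLoop cs cs.length)) := by
        rw [PySem.Chars.slice_eq_listSlice, PySem.Chars.slice_eq_listSlice,
          PySem.List.slice_to _ (Int.natCast_nonneg _), PySem.List.slice_to _ (Int.natCast_nonneg _)]
        rw [List.take_append_of_le_length (by simpa using hkle)]
      rw [hRB]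
      by_cases hp : getDirPos cs = -1
      · rw [if_pos hp]
        rw [if_pos hp] at ih
        exact ih
      · rw [if_neg hp]
        rw [if_neg hp] at ih
        have hp0 : 0 ≤ getDirPos cs := by omega
        have hRA : PySem.Chars.slice (cs ++ [c]) (some 0) (some (getDirPos cs + 1))
            = PySem.Chars.slice cs (some 0) (some (getDirPos cs + 1)) := by
          obtain ⟨m, hm⟩ := Int.eq_ofNat_of_zero_le hp0
          have hmlt : m < cs.length := by omega
          rw [hm]
          rw [PySem.Chars.slice_eq_listSlice, PySem.Chars.slice_eq_listSlice,
            show (some ((m:Int) + 1)) = some (((m+1 : Nat)) : Int) from by push_cast; rfl,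
            show (some (0:Int)) = some ((0:Nat):Int) from rfl,
            PySem.List.slice_natCast, PySem.List.slice_natCast]
          simp only [List.drop_zero, Nat.sub_zero]
          rw [List.take_append_of_le_length (by omega)]
        rw [hRA]
        exact ih

-- ===== VERDICT (by name: the statement is the Claim_ definition above) =====
theorem get_directory_spec : Claim_equal_get_directory := by
  intro s _
  unfold Spec_get_directory get_directory get_directory_alt
  exact core_eq s.toList
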